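-- pv_equiv track=rewrite | github.com/pypi-data/pypi-mirror-368 | packages/cogency/cogency-1.2.1.tar.gz/cogency-1.2.1/src/cogency/utils/heuristics.py | needs_network_retry
-- ===== SOURCE A (Python) =====
-- from typing import Dict, List
--
-- def needs_network_retry(errors: List[Dict]) -> bool:
--     """Check if errors indicate network issues that warrant retry.
--
--     Structural heuristic: Detect transient network failures that benefit from
--     exponential backoff rather than reasoning about the failure.
--     """
--     if not errors:
--         return False
--
--     network_errors = [
--         "timeout",
--         "rate limit",
--         "connection",
--         "network",
--         "429",
--         "503",
--         "502",
--     ]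
--
--     return any(
--         any(net_err in str(error.get("error", "")).lower() for net_err in network_errors)
--         for error in errors
--     )
-- ===== SOURCE B (Python) =====
-- from typing import Dict, List
--
-- _NETWORK_ERRORS = ("timeout", "rate limit", "connection", "network", "429", "503", "502")
--
--
-- def needs_network_retry(errors: List[Dict]) -> bool:
--     """Check if errors indicate network issues that warrant retry."""
--     if not errors:
--         return False
--     # Flatten all messages into one haystack; "\x00" appears in no keyword,
--     # so no keyword can match across a message boundary.
--     combined = "\x00".join(str(e.get("error", "")).lower() for e in errors)
--     return any(kw in combined for kw in _NETWORK_ERRORS)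
-- ===== Notes on version B (the rewrite author's own statement) =====
-- stated objective: alternative
-- what changed: Instead of a nested any-over-errors/any-over-keywords scan, B joins all lowered messages into one haystack separated by "\x00" (a character no keyword contains) and makes a single pass over the keyword list against that combined string.
import Mathlib
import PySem

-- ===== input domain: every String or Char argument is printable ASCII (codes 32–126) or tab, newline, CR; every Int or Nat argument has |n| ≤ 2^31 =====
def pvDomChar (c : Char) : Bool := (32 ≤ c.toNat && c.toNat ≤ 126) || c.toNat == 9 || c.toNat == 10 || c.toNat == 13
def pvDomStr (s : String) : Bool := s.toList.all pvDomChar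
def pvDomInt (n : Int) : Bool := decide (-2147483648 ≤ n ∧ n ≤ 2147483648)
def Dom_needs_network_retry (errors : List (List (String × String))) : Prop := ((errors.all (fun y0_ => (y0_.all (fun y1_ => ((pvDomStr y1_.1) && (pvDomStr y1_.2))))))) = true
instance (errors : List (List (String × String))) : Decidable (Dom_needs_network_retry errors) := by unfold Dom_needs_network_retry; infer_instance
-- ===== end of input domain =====

-- B joins all lowered messages with a "\x00" separator (present in no keyword) and scans
-- the keyword list once over the single combined haystack: same result, one flat scan.

-- ===== PORT A =====
def needs_network_retry (errors : List (List (String × String))) : Bool :=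
  if errors = [] then false
  else
    let network_errors : List String :=
      ["timeout", "rate limit", "connection", "network", "429", "503", "502"]
    -- str(error.get("error", "")) : the values are strings, so str(...) is the identity
    errors.any (fun error =>
      network_errors.any (fun net_err =>
        PySem.Str.isIn net_err (PySem.Str.lower ((PySem.Dict.mk error).getD "error" ""))))

-- ===== PORT B =====
def pvNetworkErrorsB : List String :=
  ["timeout", "rate limit", "connection", "network", "429", "503", "502"]

def needs_network_retry_alt (errors : List (List (String × String))) : Bool :=
  if errors = [] then false
  else
    let combined := PySem.Str.join "\x00"
      (errors.map (fun e => PySem.Str.lower ((PySem.Dict.mk e).getD "error" "")))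
    pvNetworkErrorsB.any (fun kw => PySem.Str.isIn kw combined)

-- ===== PRECONDITION & SPEC =====
def Spec_needs_network_retry (errors : List (List (String × String))) (out : Bool) : Prop := out = needs_network_retry_alt errors
instance (errors : List (List (String × String))) (out : Bool) : Decidable (Spec_needs_network_retry errors out) := by unfold Spec_needs_network_retry; infer_instance

-- ===== CLAIM (what is proved, stated in full; the proofs are below) =====
def Claim_equal_needs_network_retry : Prop := ∀ (errors : List (List (String × String))), Dom_needs_network_retry errors → Spec_needs_network_retry errors (needs_network_retry errors)

-- ===== LEMMAS AND PROOFS =====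

-- A sublist that avoids the splitting element lies entirely in one side of the split.
theorem pvInfix_split {kw a b : List Char} {x : Char} (hx : x ∉ kw)
    (h : kw <:+: a ++ x :: b) : kw <:+: a ∨ kw <:+: b := by
  obtain ⟨s, t, hst⟩ := h
  have hlen := congrArg List.length hst
  simp only [List.length_append, List.length_cons] at hlen
  by_cases h1 : s.length + kw.length ≤ a.length
  · left
    have hp : s ++ kw <+: a ++ x :: b := ⟨t, by simpa [List.append_assoc] using hst⟩
    have hp' : s ++ kw <+: a :=
      List.prefix_of_prefix_length_le hp (List.prefix_append a (x :: b))
        (by simp; omega)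
    exact List.IsInfix.trans ⟨s, [], by simp⟩ hp'.isInfix
  · by_cases h2 : a.length + 1 ≤ s.length
    · right
      have hs : kw ++ t <:+ a ++ x :: b := ⟨s, by simpa [List.append_assoc] using hst⟩
      have hbs : b <:+ a ++ x :: b := ⟨a ++ [x], by simp⟩
      have hs' : kw ++ t <:+ b :=
        List.suffix_of_suffix_length_le hs hbs (by simp; omega)
      exact List.IsInfix.trans ⟨[], t, by simp⟩ hs'.isInfix
    · exfalso
      apply hx
      have hia : a.length < (s ++ kw ++ t).length := by simp; omega
      have hib : a.length - s.length < kw.length := by omega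
      have hval : (s ++ kw ++ t)[a.length]'hia = kw[a.length - s.length]'hib := by
        rw [List.getElem_append_left (by simp; omega : a.length < (s ++ kw).length)]
        rw [List.getElem_append_right (by omega : s.length ≤ a.length)]
      have hval2 : (a ++ x :: b)[a.length]'(by simp) = x := by
        rw [List.getElem_append_right (le_refl a.length)]
        simp
      have h3 := List.getElem_of_eq hst hia
      rw [hval, hval2] at h3
      exact h3 ▸ List.getElem_mem hib

-- A separator-free nonempty word is in the joined string iff it is in one of the parts.
theorem pvInfix_join (kw : List Char) (x : Char) (hne : kw ≠ []) (hx : x ∉ kw) :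
    ∀ msgs : List (List Char),
      (kw <:+: PySem.Chars.join [x] msgs ↔ ∃ m ∈ msgs, kw <:+: m)
  | [] => by
      simp [PySem.Chars.join, List.intercalate, hne]
  | [m] => by
      simp [PySem.Chars.join_singleton]
  | m :: q :: rest => by
      rw [PySem.Chars.join_cons_cons]
      constructor
      · intro h
        have h' : kw <:+: m ++ x :: PySem.Chars.join [x] (q :: rest) := by
          simpa [List.append_assoc] using h
        rcases pvInfix_split hx h' with hm | hj
        · exact ⟨m, by simp, hm⟩
        · obtain ⟨m', hm', h2⟩ := (pvInfix_join kw x hne hx (q :: rest)).mp hj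
          exact ⟨m', by simp [hm'], h2⟩
      · rintro ⟨m', hm', h2⟩
        rcases List.mem_cons.mp hm' with rfl | hm'
        · obtain ⟨u, v, huv⟩ := h2
          exact ⟨u, v ++ [x] ++ PySem.Chars.join [x] (q :: rest), by
            rw [← huv]; simp [List.append_assoc]⟩
        · obtain ⟨u, v, huv⟩ := (pvInfix_join kw x hne hx (q :: rest)).mpr ⟨m', hm', h2⟩
          exact ⟨m ++ [x] ++ u, v, by rw [← huv]; simp [List.append_assoc]⟩

-- every keyword is nonempty and NUL-free
theorem pvKw_ok : ∀ kw ∈ pvNetworkErrorsB, kw.toList ≠ [] ∧ '\x00' ∉ kw.toList := by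
  decide

-- ===== VERDICT (by name: the statement is the Claim_ definition above) =====
theorem needs_network_retry_spec : Claim_equal_needs_network_retry := by
  intro errors _
  unfold Spec_needs_network_retry needs_network_retry needs_network_retry_alt
  by_cases h : errors = []
  · simp [h]
  · simp only [if_neg h, pvNetworkErrorsB]
    rw [Bool.eq_iff_iff]
    simp only [List.any_eq_true, PySem.Str.isIn_iff_infix, PySem.Str.toList_join, List.map_map]
    have hsep : ("\x00" : String).toList = ['\x00'] := rfl
    rw [hsep]
    constructor
    · rintro ⟨e, he, kw, hkw, hinf⟩
      refine ⟨kw, hkw, ?_⟩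
      obtain ⟨hne, hx⟩ := pvKw_ok kw hkw
      exact (pvInfix_join kw.toList '\x00' hne hx _).mpr
        ⟨_, List.mem_map.mpr ⟨e, he, rfl⟩, hinf⟩
    · rintro ⟨kw, hkw, hinf⟩
      obtain ⟨hne, hx⟩ := pvKw_ok kw hkw
      obtain ⟨m, hm, h2⟩ := (pvInfix_join kw.toList '\x00' hne hx _).mp hinf
      obtain ⟨e, he, rfl⟩ := List.mem_map.mp hm
      exact ⟨e, he, kw, hkw, h2⟩
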